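-- pv_equiv track=rewrite | github.com/charron-tom/advent-of-code-2020 | 14/utils.py | bin2dec_floating
-- ===== SOURCE A (Python) =====
-- import copy
--
-- MASK_BITS = 36
--
-- def bin2dec(b, bits=MASK_BITS):
--     """
--     Convert a binary to a decimal.
--     """
--     dec = 0
--     for i, bit in enumerate(b):
--         if bit == '1':
--             dec += 2 ** (bits - i - 1)
--     return dec
--
-- def bin2dec_floating(b, bits=MASK_BITS):
--     """
--     Convert a binary to a series of decimals,
--     taking into account "floating" bits.
--     """
--     for i, bit in enumerate(list(b)):
--         if bit == 'X':
--
--             b0 = list(copy.copy(b))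
--             b0[i] = '0'
--
--             b1 = list(copy.copy(b))
--             b1[i] = '1'
--
--             return bin2dec_floating("".join(b0), bits=bits) + bin2dec_floating("".join(b1), bits=bits)
--     return [bin2dec(b, bits=bits)]
-- ===== SOURCE B (Python) =====
-- MASK_BITS = 36
--
-- def bin2dec_floating(b, bits=MASK_BITS):
--     """
--     Convert a binary to a series of decimals,
--     taking into account "floating" bits.
--     """
--     base = 0
--     weights = []
--     for i, bit in enumerate(b):
--         if bit == '1':
--             base += 2 ** (bits - i - 1)
--         elif bit == 'X':
--             weights.append(2 ** (bits - i - 1))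
--     combos = [0]
--     for w in weights:
--         combos = [c + chosen for c in combos for chosen in (0, w)]
--     return [base + c for c in combos]
-- ===== Notes on version B (the rewrite author's own statement) =====
-- stated objective: alternative
-- what changed: A recursively finds the first X, rebuilds the whole string twice and recurses on both copies; B scans the string once to collect the base value and the X-bit weights, then builds the 2^k results by an iterative product over the weight list.
-- outside the precondition, e.g. on bin2dec_floating('1', 0): A returns [0.5], B returns [0.5]; on bin2dec_floating('X', 0): A returns [0, 0.5], B returns [0, 0.5]
import Mathlib
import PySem

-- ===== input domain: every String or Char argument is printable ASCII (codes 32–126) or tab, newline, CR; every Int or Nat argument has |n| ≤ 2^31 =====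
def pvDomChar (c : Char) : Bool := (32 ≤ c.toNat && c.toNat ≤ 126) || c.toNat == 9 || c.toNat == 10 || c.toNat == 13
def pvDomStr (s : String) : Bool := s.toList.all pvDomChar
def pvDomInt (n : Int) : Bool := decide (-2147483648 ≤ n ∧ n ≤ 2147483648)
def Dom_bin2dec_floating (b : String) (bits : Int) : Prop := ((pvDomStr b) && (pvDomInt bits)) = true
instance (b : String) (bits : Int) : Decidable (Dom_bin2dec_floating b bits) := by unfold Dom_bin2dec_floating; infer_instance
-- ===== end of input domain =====

-- B replaces A's recursive first-X branching (which rescans and rebuilds the string for every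
-- branch) by one scan collecting the base value and the X-bit weights, followed by an iterative
-- product of the weight choices (objective: alternative, no repeated string rebuilding).

-- ===== PORT A =====
-- helper bin2dec (the module's own helper, transliterated). Python's 2 ** (bits - i - 1) is an
-- integer exactly when the exponent is nonnegative (Pre_ guarantees that for every '1'/'X' bit);
-- the port takes the exponent with .toNat, so it is exact on Pre_.
def pvBin2dec (cs : List Char) (bits : Int) : Int :=
  (PySem.List.enumerate cs 0).foldl
    (fun dec p => if p.2 = '1' then dec + 2 ^ (bits - p.1 - 1).toNat else dec) 0

-- termination helper for the port's recursion (the first 'X' is overwritten, so the X-count drops)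
theorem pvCountX_set_lt {cs : List Char} {p : Int × Char} {c : Char} (hc : (c == 'X') = false)
    (h : (PySem.List.enumerate cs 0).find? (fun q => q.2 == 'X') = some p) :
    (cs.set p.1.toNat c).countP (· == 'X') < cs.countP (· == 'X') := by
  have hmem := List.mem_of_find?_eq_some h
  have hpred := List.find?_some h
  rw [PySem.List.mem_enumerate_iff] at hmem
  obtain ⟨k, hk, rfl⟩ := hmem
  simp only [beq_iff_eq] at hpred
  have hksimp : ((0 : Int) + (k : Int)).toNat = k := by omega
  rw [hksimp, List.set_eq_take_cons_drop c hk]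
  conv_rhs => rw [← List.take_append_drop k cs, ← List.getElem_cons_drop hk]
  simp [List.countP_append, List.countP_cons, hpred, hc]

-- the recursive expansion of A: find the first 'X' (the loop with early return), replace it by
-- '0' and by '1' and concatenate the recursive results; no 'X' left → [bin2dec(b, bits)]
def pvB2DFCore (bits : Int) (cs : List Char) : List Int :=
  match h : (PySem.List.enumerate cs 0).find? (fun p => p.2 == 'X') with
  | some p =>
      pvB2DFCore bits (cs.set p.1.toNat '0') ++ pvB2DFCore bits (cs.set p.1.toNat '1')
  | none => [pvBin2dec cs bits]
termination_by cs.countP (· == 'X')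
decreasing_by
  · exact pvCountX_set_lt (by decide) h
  · exact pvCountX_set_lt (by decide) h

def bin2dec_floating (b : String) (bits : Int) : List Int :=
  pvB2DFCore bits b.toList

-- ===== PORT B =====
def bin2dec_floating_alt (b : String) (bits : Int) : List Int :=
  -- one scan: base from the '1' bits, the weights of the 'X' bits in order
  let bw := (PySem.List.enumerate b.toList 0).foldl
      (fun (acc : Int × List Int) p =>
        if p.2 = '1' then (acc.1 + 2 ^ (bits - p.1 - 1).toNat, acc.2)
        else if p.2 = 'X' then (acc.1, acc.2 ++ [(2 : Int) ^ (bits - p.1 - 1).toNat])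
        else acc) (0, [])
  -- iterative product: each weight doubles the combo list (0 first, leftmost weight slowest)
  let combos := bw.2.foldl (fun cs w => cs.flatMap (fun c => [c + 0, c + w])) [0]
  combos.map (fun c => bw.1 + c)

-- ===== PRECONDITION & SPEC =====
-- Pre_ excludes inputs where some '1' or 'X' bit sits at an index i with bits - i - 1 < 0:
-- there Python's 2 ** (bits - i - 1) is a fraction and A returns a list containing floats,
-- not a value of the declared List-of-int type.
def Pre_bin2dec_floating (b : String) (bits : Int) : Prop :=
  ∀ p ∈ PySem.List.enumerate b.toList 0, (p.2 = '1' ∨ p.2 = 'X') → p.1 < bits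
instance (b : String) (bits : Int) : Decidable (Pre_bin2dec_floating b bits) := by
  unfold Pre_bin2dec_floating; infer_instance

def pvWitness_bin2dec_floating : String × Int := ("1X0X", 5)

def Spec_bin2dec_floating (b : String) (bits : Int) (out : List Int) : Prop := out = bin2dec_floating_alt b bits
instance (b : String) (bits : Int) (out : List Int) : Decidable (Spec_bin2dec_floating b bits out) := by unfold Spec_bin2dec_floating; infer_instance

-- ===== CLAIM (what is proved, stated in full; the proofs are below) =====
def Claim_equal_bin2dec_floating : Prop := ∀ (b : String) (bits : Int), Dom_bin2dec_floating b bits → Pre_bin2dec_floating b bits → Spec_bin2dec_floating b bits (bin2dec_floating b bits)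

-- ===== LEMMAS AND PROOFS =====

-- the weight of a bit position, the base value and the X-weight list of an enumerated string
def pvW (bits : Int) (p : Int × Char) : Int := 2 ^ (bits - p.1 - 1).toNat
def pvBase (bits : Int) (e : List (Int × Char)) : Int :=
  (e.map (fun p => if p.2 = '1' then pvW bits p else 0)).sum
def pvWs (bits : Int) (e : List (Int × Char)) : List Int :=
  (e.filter (fun p => p.2 == 'X')).map (pvW bits)
def pvGo (ws : List Int) (cs : List Int) : List Int :=
  ws.foldl (fun cs w => cs.flatMap (fun c => [c + 0, c + w])) cs

theorem pvBin2dec_fold (bits : Int) (e : List (Int × Char)) (a : Int) :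
    e.foldl (fun dec p => if p.2 = '1' then dec + 2 ^ (bits - p.1 - 1).toNat else dec) a
      = a + pvBase bits e := by
  induction e generalizing a with
  | nil => simp [pvBase]
  | cons p t ih =>
      simp only [List.foldl_cons, pvBase, List.map_cons, List.sum_cons]
      by_cases h1 : p.2 = '1'
      · rw [if_pos h1, if_pos h1, ih]
        simp only [pvBase, pvW]
        ring
      · rw [if_neg h1, if_neg h1, ih]
        simp only [pvBase]
        ring

theorem pvBin2dec_eq (cs : List Char) (bits : Int) :
    pvBin2dec cs bits = pvBase bits (PySem.List.enumerate cs 0) := by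
  unfold pvBin2dec
  rw [pvBin2dec_fold]
  ring

theorem pvPairFold (bits : Int) (e : List (Int × Char)) (a : Int) (ws : List Int) :
    e.foldl (fun (acc : Int × List Int) p =>
        if p.2 = '1' then (acc.1 + 2 ^ (bits - p.1 - 1).toNat, acc.2)
        else if p.2 = 'X' then (acc.1, acc.2 ++ [(2 : Int) ^ (bits - p.1 - 1).toNat])
        else acc) (a, ws)
      = (a + pvBase bits e, ws ++ pvWs bits e) := by
  induction e generalizing a ws with
  | nil => simp [pvBase, pvWs]
  | cons p t ih =>
      simp only [List.foldl_cons, pvBase, pvWs, List.map_cons, List.sum_cons, List.filter_cons]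
      by_cases h1 : p.2 = '1'
      · have hX : (p.2 == 'X') = false := by simp [h1]
        rw [if_pos h1, if_pos h1, hX, ih]
        simp only [pvBase, pvWs, pvW]
        exact Prod.ext (by ring) rfl
      · by_cases hX : p.2 = 'X'
        · have hXb : (p.2 == 'X') = true := by simp [hX]
          rw [if_neg h1, if_pos hX, if_neg h1, hXb, ih]
          simp only [pvBase, pvWs]
          exact Prod.ext (by simp only [pvW]; ring) (by simp [pvW])
        · have hXb : (p.2 == 'X') = false := by simp [hX]
          rw [if_neg h1, if_neg hX, if_neg h1, hXb, ih]
          simp only [pvBase, pvWs]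
          exact Prod.ext (by ring) rfl

theorem pvGo_append (ws : List Int) (cs1 cs2 : List Int) :
    pvGo ws (cs1 ++ cs2) = pvGo ws cs1 ++ pvGo ws cs2 := by
  induction ws generalizing cs1 cs2 with
  | nil => simp [pvGo]
  | cons w t ih =>
      simp only [pvGo, List.foldl_cons, List.flatMap_append]
      exact ih _ _

theorem pvGo_map (ws : List Int) (cs : List Int) (c : Int) :
    pvGo ws (cs.map (c + ·)) = (pvGo ws cs).map (c + ·) := by
  induction ws generalizing cs with
  | nil => simp [pvGo]
  | cons w t ih =>
      simp only [pvGo, List.foldl_cons] at ih ⊢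
      rw [← ih]
      congr 1
      rw [List.map_flatMap, List.flatMap_map]
      apply List.flatMap_congr
      intro x _
      simp [add_assoc]

theorem pvCore_eq (bits : Int) (cs : List Char) :
    pvB2DFCore bits cs
      = (pvGo (pvWs bits (PySem.List.enumerate cs 0)) [0]).map
          (fun c => pvBase bits (PySem.List.enumerate cs 0) + c) := by
  induction cs using pvB2DFCore.induct with
  | case1 cs p h ih0 ih1 =>
      obtain ⟨hpred, as, bs, he, has⟩ := List.find?_eq_some_iff_append.mp h
      have hlen : as.length < cs.length := by
        have hl := congrArg List.length he
        simp [PySem.List.length_enumerate] at hl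
        omega
      set k := as.length with hk
      have hgetp : p = ((k : Int), cs[k]) := by
        have h1 := PySem.List.getElem_enumerate (xs := cs) (0 : Int) k
          (by simpa [PySem.List.length_enumerate] using hlen)
        have h2 : (PySem.List.enumerate cs 0)[k]'(by simpa [PySem.List.length_enumerate] using hlen) = p := by
          simp only [he]
          exact List.getElem_of_append rfl rfl
        rw [h2] at h1
        simpa using h1
      have hkX : cs[k] = 'X' := by
        have := hpred
        rw [hgetp] at this
        simpa using this
      have htoNat : p.1.toNat = k := by rw [hgetp]; simp
      set pre := cs.take k with hpre
      set suf := cs.drop (k + 1) with hsuf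
      have hpreLen : pre.length = k := by
        simp only [hpre, List.length_take]
        omega
      have hcs : cs = pre ++ 'X' :: suf := by
        conv_lhs => rw [← List.take_append_drop k cs]
        rw [← List.getElem_cons_drop hlen, hkX]
      have hset0 : cs.set k '0' = pre ++ '0' :: suf := List.set_eq_take_cons_drop '0' hlen
      have hset1 : cs.set k '1' = pre ++ '1' :: suf := List.set_eq_take_cons_drop '1' hlen
      have hE : ∀ c : Char, PySem.List.enumerate (pre ++ c :: suf) 0
          = PySem.List.enumerate pre 0 ++ ((k : Int), c) :: PySem.List.enumerate suf ((k : Int) + 1) := by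
        intro c
        rw [PySem.List.enumerate_append, PySem.List.enumerate_cons, hpreLen]
        norm_num
      have hEq2 : as ++ p :: bs
          = PySem.List.enumerate pre 0 ++ ((k : Int), 'X') :: PySem.List.enumerate suf ((k : Int) + 1) := by
        rw [← he, ← hE 'X', ← hcs]
      have hasE : as = PySem.List.enumerate pre 0 :=
        List.append_inj_left hEq2
          (by simp only [PySem.List.length_enumerate, hpreLen]; exact hk.symm)
      have hpreF : (PySem.List.enumerate pre 0).filter (fun q => q.2 == 'X') = [] := by
        rw [List.filter_eq_nil_iff]
        intro q hq
        simpa using has q (hasE ▸ hq)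
      set wk : Int := 2 ^ (bits - (k : Int) - 1).toNat with hwk
      set W : List Int := pvWs bits (PySem.List.enumerate suf ((k : Int) + 1)) with hW
      set B0 : Int := pvBase bits (PySem.List.enumerate pre 0) with hB0
      set Bs : Int := pvBase bits (PySem.List.enumerate suf ((k : Int) + 1)) with hBs
      have hbase : ∀ c : Char, pvBase bits (PySem.List.enumerate (pre ++ c :: suf) 0)
          = B0 + (if c = '1' then wk else 0) + Bs := by
        intro c
        rw [hE c]
        simp only [pvBase, List.map_append, List.map_cons, List.sum_append, List.sum_cons, pvW, hB0, hBs, hwk]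
        ring
      have hws : ∀ c : Char, (c == 'X') = false →
          pvWs bits (PySem.List.enumerate (pre ++ c :: suf) 0) = W := by
        intro c hc
        rw [hE c]
        simp only [pvWs, List.filter_append, List.filter_cons, hc, hpreF, hW]
        simp
      have hwsX : pvWs bits (PySem.List.enumerate (pre ++ 'X' :: suf) 0) = wk :: W := by
        rw [hE 'X']
        simp only [pvWs, List.filter_append, List.filter_cons, hpreF, List.nil_append, hW, hwk]
        simp [pvW]
      have heq : pvB2DFCore bits cs
          = pvB2DFCore bits (cs.set p.1.toNat '0') ++ pvB2DFCore bits (cs.set p.1.toNat '1') := by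
        rw [pvB2DFCore.eq_def]
        split
        · rename_i p' h'
          rw [h'] at h
          cases h
          rfl
        · rename_i h'
          rw [h'] at h
          cases h
      rw [htoNat, hset0] at ih0
      rw [htoNat, hset1] at ih1
      rw [htoNat, hset0, hset1] at heq
      rw [heq, ih0, ih1, hws '0' (by decide), hbase '0', hws '1' (by decide), hbase '1']
      conv_rhs => rw [hcs]
      rw [hwsX, hbase 'X']
      simp only [Char.reduceEq, reduceIte]
      have hgo : pvGo (wk :: W) [0] = pvGo W [0] ++ (pvGo W [0]).map (wk + ·) := by
        have : pvGo (wk :: W) [0] = pvGo W [(0 : Int) + 0, 0 + wk] := by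
          simp only [pvGo, List.foldl_cons, List.flatMap_cons, List.flatMap_nil, List.append_nil]
        rw [this]
        have h2 : [(0 : Int) + 0, 0 + wk] = [0] ++ [0].map (wk + ·) := by simp
        rw [h2, pvGo_append, pvGo_map]
      rw [hgo]
      simp only [List.map_append, List.map_map]
      congr 1
      apply List.map_congr_left
      intro x _
      simp only [Function.comp_apply]
      ring
  | case2 cs h =>
      have hnone := List.find?_eq_none.mp h
      have hW : pvWs bits (PySem.List.enumerate cs 0) = [] := by
        unfold pvWs
        rw [List.filter_eq_nil_iff.mpr (by intro p hp; exact hnone p hp)]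
        rfl
      have heq : pvB2DFCore bits cs = [pvBin2dec cs bits] := by
        rw [pvB2DFCore.eq_def]
        split
        · rename_i p' h'
          rw [h'] at h
          cases h
        · rfl
      rw [heq, pvBin2dec_eq, hW]
      simp [pvGo]

-- ===== VERDICT (by name: the statement is the Claim_ definition above) =====
theorem bin2dec_floating_spec : Claim_equal_bin2dec_floating := by
  intro b bits _ _
  unfold Spec_bin2dec_floating bin2dec_floating bin2dec_floating_alt
  rw [pvCore_eq, pvPairFold]
  simp [pvGo]
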